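-- pv_equiv track=rewrite | github.com/FarenRavirar/midia-faren | mfaren/transcribe_cache.py | _entry_primary_file
-- ===== SOURCE A (Python) =====
-- def _entry_primary_file(entry):
--     files = (entry or {}).get("files") or {}
--     if not isinstance(files, dict) or not files:
--         return None
--     preferred = files.get("wav")
--     if preferred:
--         return preferred
--     for _, path in sorted(files.items()):
--         if path:
--             return path
--     return None
-- ===== SOURCE B (Python) =====
-- def _entry_primary_file(entry):
--     files = (entry or {}).get("files") or {}
--     if not isinstance(files, dict) or not files:
--         return None
--     preferred = files.get("wav")
--     if preferred:
--         return preferred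
--     best = None
--     for item in files.items():
--         if item[1] and (best is None
--                         or item[0] < best[0]
--                         or (item[0] == best[0] and item[1] < best[1])):
--             best = item
--     return best[1] if best is not None else None
-- ===== Notes on version B (the rewrite author's own statement) =====
-- stated objective: alternative
-- what changed: Replaces A's sort-then-scan-for-first-truthy over files.items() with a single linear pass that tracks the lexicographically smallest (key, path) item with a truthy path.
import Mathlib
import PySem

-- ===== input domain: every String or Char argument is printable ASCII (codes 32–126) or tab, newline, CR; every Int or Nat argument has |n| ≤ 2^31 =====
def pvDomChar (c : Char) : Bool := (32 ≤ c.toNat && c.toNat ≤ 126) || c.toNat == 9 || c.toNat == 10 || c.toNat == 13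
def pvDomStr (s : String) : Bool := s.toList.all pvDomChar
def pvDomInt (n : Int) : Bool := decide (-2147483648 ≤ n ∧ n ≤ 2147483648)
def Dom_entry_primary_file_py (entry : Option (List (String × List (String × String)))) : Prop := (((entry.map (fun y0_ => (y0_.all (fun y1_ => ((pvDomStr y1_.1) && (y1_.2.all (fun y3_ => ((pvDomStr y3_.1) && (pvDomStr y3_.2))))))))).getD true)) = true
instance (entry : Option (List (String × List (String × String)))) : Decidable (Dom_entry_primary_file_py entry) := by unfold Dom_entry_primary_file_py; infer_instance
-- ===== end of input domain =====

-- B replaces A's sort-then-scan with a single linear pass tracking the lexicographically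
-- smallest truthy (key, path) item (objective: alternative — one O(n) pass instead of sorting).

-- ===== PORT A =====
-- shared extraction, a transliteration of the two guard lines both Pythons start with:
-- `files = (entry or {}).get("files") or {}` (the isinstance test is always true at this type)
def pvFiles (entry : Option (List (String × List (String × String)))) : List (String × String) :=
  let base : List (String × List (String × String)) :=
    match entry with
    | none => []
    | some e => if e.isEmpty then [] else e
  match (PySem.Dict.mk base).get? "files" with
  | none => []
  | some fs => if fs.isEmpty then [] else fs

-- Python truthiness of `files.get("wav")`
def pvOptTruthy : Option String → Bool
  | some s => s ≠ ""
  | none => false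

-- `for _, path in sorted(files.items()): if path: return path` / final `return None`
def epfScan : List (String × String) → Option String
  | [] => none
  | (_, p) :: rest => if p ≠ "" then some p else epfScan rest

def entry_primary_file_py (entry : Option (List (String × List (String × String)))) : Option String :=
  let files := pvFiles entry
  if files.isEmpty then none
  else
    let preferred := (PySem.Dict.mk files).get? "wav"
    if pvOptTruthy preferred then preferred
    else epfScan (PySem.List.sorted2 files (fun p => p.1) (fun p => p.2))

-- ===== PORT B =====
-- Python's tuple comparison `item < best`, written out componentwise as in Source B
def pvPairLt (a b : String × String) : Bool :=
  decide (a.1 < b.1) || (a.1 == b.1 && decide (a.2 < b.2))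

-- `for item in files.items(): if item[1] and (best is None or item < best): best = item`
def epfBest (files : List (String × String)) : Option (String × String) :=
  files.foldl
    (fun best item =>
      if decide (item.2 ≠ "") && (match best with | none => true | some b => pvPairLt item b)
      then some item else best)
    none

def entry_primary_file_py_alt (entry : Option (List (String × List (String × String)))) : Option String :=
  let files := pvFiles entry
  if files.isEmpty then none
  else
    let preferred := (PySem.Dict.mk files).get? "wav"
    if pvOptTruthy preferred then preferred
    else
      match epfBest files with
      | some b => some b.2
      | none => none

-- ===== PRECONDITION & SPEC =====
def Spec_entry_primary_file_py (entry : Option (List (String × List (String × String)))) (out : Option String) : Prop := out = entry_primary_file_py_alt entry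
instance (entry : Option (List (String × List (String × String)))) (out : Option String) : Decidable (Spec_entry_primary_file_py entry out) := by unfold Spec_entry_primary_file_py; infer_instance

-- ===== CLAIM (what is proved, stated in full; the proofs are below) =====
def Claim_equal_entry_primary_file_py : Prop := ∀ (entry : Option (List (String × List (String × String)))), Dom_entry_primary_file_py entry → Spec_entry_primary_file_py entry (entry_primary_file_py entry)

-- ===== LEMMAS AND PROOFS =====

-- B's componentwise comparison is the lexicographic order on pairs
theorem pvPairLt_eq (a b : String × String) :
    pvPairLt a b = decide (toLex a < toLex b) := by
  by_cases h1 : a.1 < b.1 <;> by_cases h2 : a.1 = b.1 <;>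
    simp [pvPairLt, Prod.Lex.toLex_lt_toLex, h1, h2]

-- A's sorted2 on (key, value) pairs is sorting by the lexicographic order
theorem sorted2_eq_sorted_lex (L : List (String × String)) :
    PySem.List.sorted2 L (fun p => p.1) (fun p => p.2) =
      PySem.List.sorted L (fun p => toLex p) := by
  have hbe : (fun (a b : String × String) =>
      decide (a.1 < b.1) || (!decide (b.1 < a.1) && decide (a.2 < b.2))) =
      fun a b => decide (toLex a < toLex b) := by
    funext a b
    rcases lt_trichotomy a.1 b.1 with h | h | h
    · simp [Prod.Lex.toLex_lt_toLex, h, lt_asymm h]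
    · simp [Prod.Lex.toLex_lt_toLex, h]
    · simp [Prod.Lex.toLex_lt_toLex, lt_asymm h, h, (ne_of_gt h)]
  simp only [PySem.List.sorted2, PySem.List.sorted]
  simp only [Bool.false_eq_true, if_false, hbe]

def pvTruthyB (p : String × String) : Bool := decide (p.2 ≠ "")

theorem epfScan_eq_head (xs : List (String × String)) :
    epfScan xs = ((xs.filter pvTruthyB).head?).map (fun p => p.2) := by
  induction xs with
  | nil => rfl
  | cons x rest ih =>
    by_cases h : x.2 = "" <;>
      simp [epfScan, pvTruthyB, h, ih]

-- the running minimum used to characterise B's fold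
def pvMin2 (x y : String × String) : String × String := if pvPairLt y x then y else x

theorem epfBest_foldl_some (T : List (String × String)) (b : String × String) :
    T.foldl
      (fun best item =>
        if (match best with | none => true | some b0 => pvPairLt item b0)
        then some item else best)
      (some b)
      = some (T.foldl pvMin2 b) := by
  induction T generalizing b with
  | nil => rfl
  | cons y T ih =>
    by_cases hlt : pvPairLt y b = true <;>
      simp only [List.foldl_cons, hlt, if_true, if_false, Bool.false_eq_true, ih, pvMin2]

theorem epfBest_eq (L : List (String × String)) :
    epfBest L = match L.filter pvTruthyB with
      | [] => none
      | b :: T => some (T.foldl pvMin2 b) := by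
  have hsplit : (fun (best : Option (String × String)) (item : String × String) =>
      if decide (item.2 ≠ "") && (match best with | none => true | some b => pvPairLt item b)
      then some item else best) =
      fun best item => if pvTruthyB item then
        (if (match best with | none => true | some b0 => pvPairLt item b0)
         then some item else best) else best := by
    funext best item
    by_cases h : item.2 = "" <;> simp [pvTruthyB, h]
  unfold epfBest
  rw [hsplit, PySem.List.foldl_if_eq_foldl_filter]
  cases hF : L.filter pvTruthyB with
  | nil => rfl
  | cons b T => simp [epfBest_foldl_some]

theorem foldl_pvMin2_spec (T : List (String × String)) (b : String × String) :
    (T.foldl pvMin2 b = b ∨ T.foldl pvMin2 b ∈ T) ∧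
    toLex (T.foldl pvMin2 b) ≤ toLex b ∧
    ∀ y ∈ T, toLex (T.foldl pvMin2 b) ≤ toLex y := by
  induction T generalizing b with
  | nil => simp
  | cons y T ih =>
    simp only [List.foldl_cons]
    obtain ⟨hmem, hle, hall⟩ := ih (pvMin2 b y)
    have hmin : toLex (pvMin2 b y) ≤ toLex b ∧ toLex (pvMin2 b y) ≤ toLex y := by
      unfold pvMin2
      by_cases h : pvPairLt y b
      · have := of_decide_eq_true (pvPairLt_eq y b ▸ h)
        simp [h, le_of_lt this]
      · have : ¬ toLex y < toLex b := fun hc => h (by rw [pvPairLt_eq]; exact decide_eq_true hc)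
        simp [h, le_of_not_gt this]
    refine ⟨?_, le_trans hle hmin.1, ?_⟩
    · rcases hmem with h | h
      · have hby : pvMin2 b y = b ∨ pvMin2 b y = y := by
          unfold pvMin2; split <;> simp
        rcases hby with e | e <;> rw [h, e] <;> simp
      · simp [h]
    · intro z hz
      rcases List.mem_cons.mp hz with rfl | hz
      · exact le_trans hle hmin.2
      · exact hall z hz

-- first truthy element of the lex-sorted list = lex-minimum of the truthy elements
theorem core (L : List (String × String)) :
    epfScan (PySem.List.sorted2 L (fun p => p.1) (fun p => p.2)) =
      match epfBest L with
      | some b => some b.2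
      | none => none := by
  rw [sorted2_eq_sorted_lex, epfScan_eq_head, epfBest_eq]
  have hperm : ((PySem.List.sorted L (fun p => toLex p)).filter pvTruthyB).Perm
      (L.filter pvTruthyB) := (PySem.List.sorted_perm L _ false).filter _
  have hpw : ((PySem.List.sorted L (fun p => toLex p)).filter pvTruthyB).Pairwise
      (fun a b => toLex a ≤ toLex b) :=
    (PySem.List.sorted_pairwise L (fun p => toLex p)).filter _
  cases hF : L.filter pvTruthyB with
  | nil =>
    have : (PySem.List.sorted L (fun p => toLex p)).filter pvTruthyB = [] :=
      List.Perm.eq_nil (hF ▸ hperm)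
    simp [this]
  | cons b T =>
    obtain ⟨hmem, hleb, hall⟩ := foldl_pvMin2_spec T b
    set m := T.foldl pvMin2 b with hm
    have hmmem : m ∈ b :: T := by rcases hmem with h | h <;> simp [h]
    have hmmin : ∀ y ∈ b :: T, toLex m ≤ toLex y := by
      intro y hy; rcases List.mem_cons.mp hy with rfl | hy
      · exact hleb
      · exact hall y hy
    cases hS : (PySem.List.sorted L (fun p => toLex p)).filter pvTruthyB with
    | nil =>
      exfalso
      have := List.Perm.eq_nil (hS ▸ hperm).symm
      simp [hF] at this
    | cons h rest =>
      have hperm' : (h :: rest).Perm (b :: T) := hS ▸ hF ▸ hperm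
      have hhmem : h ∈ b :: T := hperm'.mem_iff.mp (by simp)
      have h1 : toLex m ≤ toLex h := hmmin h hhmem
      have h2 : toLex h ≤ toLex m := by
        have hmS : m ∈ h :: rest := hperm'.mem_iff.mpr hmmem
        rcases List.mem_cons.mp hmS with rfl | hmrest
        · exact le_refl _
        · have hpw' := hS ▸ hpw
          exact (List.pairwise_cons.mp hpw').1 m hmrest
      have heq : h = m := toLex.injective (le_antisymm h2 h1)
      simp [heq, hm]

-- ===== VERDICT (by name: the statement is the Claim_ definition above) =====
theorem entry_primary_file_py_spec : Claim_equal_entry_primary_file_py := by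
  intro entry _
  unfold Spec_entry_primary_file_py entry_primary_file_py entry_primary_file_py_alt
  simp only [core]
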